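-- pv_equiv track=rewrite | github.com/arhangel66/SpeakFluentAI | backend/app/common/logger.py | get_took_status
-- ===== SOURCE A (Python) =====
-- def get_took_status(took_ms) -> str:
--     """
--     Returns a string describing the status of the request based on the time it took.
--     """
--     statuses = {
--         100: "one",
--         300: "two",
--         500: "three",
--         1000: "four",
--         5000: "five",
--         30000: "six",
--         60 * 1000: "seven",
--         2 * 60 * 1000: "eight",
--         5 * 60 * 1000: "nine",
--         10 * 60 * 1000: "ten",
--     }
--
--     took_status = [status for status_ms, status in statuses.items() if took_ms > status_ms]
--
--     return ", ".join(took_status)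
-- ===== SOURCE B (Python) =====
-- import bisect
--
-- _THRESHOLDS = [100, 300, 500, 1000, 5000, 30000, 60000, 120000, 300000, 600000]
-- _LABELS = ["one", "two", "three", "four", "five", "six", "seven", "eight", "nine", "ten"]
--
-- def get_took_status(took_ms) -> str:
--     n = bisect.bisect_left(_THRESHOLDS, took_ms)
--     return ", ".join(_LABELS[:n])
-- ===== Notes on version B (the rewrite author's own statement) =====
-- stated objective: idiomatic
-- what changed: Replaced the dict-comprehension linear filter with a sorted threshold list + bisect_left binary search, joining the corresponding label prefix.
import Mathlib
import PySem

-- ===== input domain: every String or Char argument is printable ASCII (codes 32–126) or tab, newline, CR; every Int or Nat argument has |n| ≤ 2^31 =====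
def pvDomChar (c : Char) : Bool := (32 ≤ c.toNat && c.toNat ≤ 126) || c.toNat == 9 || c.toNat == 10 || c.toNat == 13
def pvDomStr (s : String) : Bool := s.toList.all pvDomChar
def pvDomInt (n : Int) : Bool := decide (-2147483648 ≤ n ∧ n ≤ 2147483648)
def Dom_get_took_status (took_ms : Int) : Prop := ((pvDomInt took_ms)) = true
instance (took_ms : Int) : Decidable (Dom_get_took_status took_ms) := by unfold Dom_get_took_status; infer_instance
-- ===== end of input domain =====

-- B replaces A's linear filter over the dict with a binary search (bisect_left) over a
-- sorted threshold list and joins the corresponding label prefix; objective: idiomatic.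

-- ===== PORT A =====
-- the dict literal has distinct keys, so its items() is this association list in insertion order
def pvStatuses : List (Int × String) :=
  [(100, "one"), (300, "two"), (500, "three"), (1000, "four"), (5000, "five"),
   (30000, "six"), (60 * 1000, "seven"), (2 * 60 * 1000, "eight"),
   (5 * 60 * 1000, "nine"), (10 * 60 * 1000, "ten")]

def get_took_status (took_ms : Int) : String :=
  let took_status := pvStatuses.foldl
    (fun acc kv => if took_ms > kv.1 then acc ++ [kv.2] else acc) []
  PySem.Str.join ", " took_status

-- ===== PORT B =====
def pvThresholds : List Int := [100, 300, 500, 1000, 5000, 30000, 60000, 120000, 300000, 600000]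
def pvLabels : List String := ["one", "two", "three", "four", "five", "six", "seven", "eight", "nine", "ten"]

-- CPython's bisect.bisect_left loop: while lo < hi: mid = (lo+hi)//2; if a[mid] < x: lo = mid+1 else hi = mid
def pvBisectLeft (a : List Int) (x : Int) (lo hi : Nat) : Nat :=
  if lo < hi then
    let mid := (lo + hi) / 2
    if a.getD mid 0 < x then pvBisectLeft a x (mid + 1) hi
    else pvBisectLeft a x lo mid
  else lo
termination_by hi - lo
decreasing_by all_goals omega

def get_took_status_alt (took_ms : Int) : String :=
  let n := pvBisectLeft pvThresholds took_ms 0 pvThresholds.length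
  PySem.Str.join ", " (pvLabels.take n)

-- ===== PRECONDITION & SPEC =====
def Spec_get_took_status (took_ms : Int) (out : String) : Prop := out = get_took_status_alt took_ms
instance (took_ms : Int) (out : String) : Decidable (Spec_get_took_status took_ms out) := by unfold Spec_get_took_status; infer_instance

-- ===== CLAIM (what is proved, stated in full; the proofs are below) =====
def Claim_equal_get_took_status : Prop := ∀ (took_ms : Int), Dom_get_took_status took_ms → Spec_get_took_status took_ms (get_took_status took_ms)

-- ===== LEMMAS AND PROOFS =====
-- Both sides are piecewise constant with breakpoints at the ten thresholds;
-- case-split on the interval containing took_ms and evaluate each side.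
theorem get_took_status_eval (t : Int) :
    get_took_status t = get_took_status_alt t := by
  by_cases h1 : (100:Int) < t
  ·
    by_cases h2 : (300:Int) < t
    ·
      by_cases h3 : (500:Int) < t
      ·
        by_cases h4 : (1000:Int) < t
        ·
          by_cases h5 : (5000:Int) < t
          ·
            by_cases h6 : (30000:Int) < t
            ·
              by_cases h7 : (60000:Int) < t
              ·
                by_cases h8 : (120000:Int) < t
                ·
                  by_cases h9 : (300000:Int) < t
                  ·
                    by_cases h10 : (600000:Int) < t
                    ·
                      have f0 : (100:Int) < t := by omega
                      have f1 : (300:Int) < t := by omega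
                      have f2 : (500:Int) < t := by omega
                      have f3 : (1000:Int) < t := by omega
                      have f4 : (5000:Int) < t := by omega
                      have f5 : (30000:Int) < t := by omega
                      have f6 : (60000:Int) < t := by omega
                      have f7 : (120000:Int) < t := by omega
                      have f8 : (300000:Int) < t := by omega
                      have f9 : (600000:Int) < t := by omega
                      simp [get_took_status, get_took_status_alt, pvStatuses, pvThresholds, pvLabels,
                        pvBisectLeft, f0, f1, f2, f3, f4, f5, f6, f7, f8, f9]
                    ·
                      have f0 : (100:Int) < t := by omega
                      have f1 : (300:Int) < t := by omega
                      have f2 : (500:Int) < t := by omega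
                      have f3 : (1000:Int) < t := by omega
                      have f4 : (5000:Int) < t := by omega
                      have f5 : (30000:Int) < t := by omega
                      have f6 : (60000:Int) < t := by omega
                      have f7 : (120000:Int) < t := by omega
                      have f8 : (300000:Int) < t := by omega
                      have f9 : ¬ (600000:Int) < t := by omega
                      simp [get_took_status, get_took_status_alt, pvStatuses, pvThresholds, pvLabels,
                        pvBisectLeft, f0, f1, f2, f3, f4, f5, f6, f7, f8, f9]
                  ·
                    have f0 : (100:Int) < t := by omega
                    have f1 : (300:Int) < t := by omega
                    have f2 : (500:Int) < t := by omega
                    have f3 : (1000:Int) < t := by omega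
                    have f4 : (5000:Int) < t := by omega
                    have f5 : (30000:Int) < t := by omega
                    have f6 : (60000:Int) < t := by omega
                    have f7 : (120000:Int) < t := by omega
                    have f8 : ¬ (300000:Int) < t := by omega
                    have f9 : ¬ (600000:Int) < t := by omega
                    simp [get_took_status, get_took_status_alt, pvStatuses, pvThresholds, pvLabels,
                      pvBisectLeft, f0, f1, f2, f3, f4, f5, f6, f7, f8, f9]
                ·
                  have f0 : (100:Int) < t := by omega
                  have f1 : (300:Int) < t := by omega
                  have f2 : (500:Int) < t := by omega
                  have f3 : (1000:Int) < t := by omega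
                  have f4 : (5000:Int) < t := by omega
                  have f5 : (30000:Int) < t := by omega
                  have f6 : (60000:Int) < t := by omega
                  have f7 : ¬ (120000:Int) < t := by omega
                  have f8 : ¬ (300000:Int) < t := by omega
                  have f9 : ¬ (600000:Int) < t := by omega
                  simp [get_took_status, get_took_status_alt, pvStatuses, pvThresholds, pvLabels,
                    pvBisectLeft, f0, f1, f2, f3, f4, f5, f6, f7, f8, f9]
              ·
                have f0 : (100:Int) < t := by omega
                have f1 : (300:Int) < t := by omega
                have f2 : (500:Int) < t := by omega
                have f3 : (1000:Int) < t := by omega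
                have f4 : (5000:Int) < t := by omega
                have f5 : (30000:Int) < t := by omega
                have f6 : ¬ (60000:Int) < t := by omega
                have f7 : ¬ (120000:Int) < t := by omega
                have f8 : ¬ (300000:Int) < t := by omega
                have f9 : ¬ (600000:Int) < t := by omega
                simp [get_took_status, get_took_status_alt, pvStatuses, pvThresholds, pvLabels,
                  pvBisectLeft, f0, f1, f2, f3, f4, f5, f6, f7, f8, f9]
            ·
              have f0 : (100:Int) < t := by omega
              have f1 : (300:Int) < t := by omega
              have f2 : (500:Int) < t := by omega
              have f3 : (1000:Int) < t := by omega
              have f4 : (5000:Int) < t := by omega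
              have f5 : ¬ (30000:Int) < t := by omega
              have f6 : ¬ (60000:Int) < t := by omega
              have f7 : ¬ (120000:Int) < t := by omega
              have f8 : ¬ (300000:Int) < t := by omega
              have f9 : ¬ (600000:Int) < t := by omega
              simp [get_took_status, get_took_status_alt, pvStatuses, pvThresholds, pvLabels,
                pvBisectLeft, f0, f1, f2, f3, f4, f5, f6, f7, f8, f9]
          ·
            have f0 : (100:Int) < t := by omega
            have f1 : (300:Int) < t := by omega
            have f2 : (500:Int) < t := by omega
            have f3 : (1000:Int) < t := by omega
            have f4 : ¬ (5000:Int) < t := by omega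
            have f5 : ¬ (30000:Int) < t := by omega
            have f6 : ¬ (60000:Int) < t := by omega
            have f7 : ¬ (120000:Int) < t := by omega
            have f8 : ¬ (300000:Int) < t := by omega
            have f9 : ¬ (600000:Int) < t := by omega
            simp [get_took_status, get_took_status_alt, pvStatuses, pvThresholds, pvLabels,
              pvBisectLeft, f0, f1, f2, f3, f4, f5, f6, f7, f8, f9]
        ·
          have f0 : (100:Int) < t := by omega
          have f1 : (300:Int) < t := by omega
          have f2 : (500:Int) < t := by omega
          have f3 : ¬ (1000:Int) < t := by omega
          have f4 : ¬ (5000:Int) < t := by omega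
          have f5 : ¬ (30000:Int) < t := by omega
          have f6 : ¬ (60000:Int) < t := by omega
          have f7 : ¬ (120000:Int) < t := by omega
          have f8 : ¬ (300000:Int) < t := by omega
          have f9 : ¬ (600000:Int) < t := by omega
          simp [get_took_status, get_took_status_alt, pvStatuses, pvThresholds, pvLabels,
            pvBisectLeft, f0, f1, f2, f3, f4, f5, f6, f7, f8, f9]
      ·
        have f0 : (100:Int) < t := by omega
        have f1 : (300:Int) < t := by omega
        have f2 : ¬ (500:Int) < t := by omega
        have f3 : ¬ (1000:Int) < t := by omega
        have f4 : ¬ (5000:Int) < t := by omega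
        have f5 : ¬ (30000:Int) < t := by omega
        have f6 : ¬ (60000:Int) < t := by omega
        have f7 : ¬ (120000:Int) < t := by omega
        have f8 : ¬ (300000:Int) < t := by omega
        have f9 : ¬ (600000:Int) < t := by omega
        simp [get_took_status, get_took_status_alt, pvStatuses, pvThresholds, pvLabels,
          pvBisectLeft, f0, f1, f2, f3, f4, f5, f6, f7, f8, f9]
    ·
      have f0 : (100:Int) < t := by omega
      have f1 : ¬ (300:Int) < t := by omega
      have f2 : ¬ (500:Int) < t := by omega
      have f3 : ¬ (1000:Int) < t := by omega
      have f4 : ¬ (5000:Int) < t := by omega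
      have f5 : ¬ (30000:Int) < t := by omega
      have f6 : ¬ (60000:Int) < t := by omega
      have f7 : ¬ (120000:Int) < t := by omega
      have f8 : ¬ (300000:Int) < t := by omega
      have f9 : ¬ (600000:Int) < t := by omega
      simp [get_took_status, get_took_status_alt, pvStatuses, pvThresholds, pvLabels,
        pvBisectLeft, f0, f1, f2, f3, f4, f5, f6, f7, f8, f9]
  ·
    have f0 : ¬ (100:Int) < t := by omega
    have f1 : ¬ (300:Int) < t := by omega
    have f2 : ¬ (500:Int) < t := by omega
    have f3 : ¬ (1000:Int) < t := by omega
    have f4 : ¬ (5000:Int) < t := by omega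
    have f5 : ¬ (30000:Int) < t := by omega
    have f6 : ¬ (60000:Int) < t := by omega
    have f7 : ¬ (120000:Int) < t := by omega
    have f8 : ¬ (300000:Int) < t := by omega
    have f9 : ¬ (600000:Int) < t := by omega
    simp [get_took_status, get_took_status_alt, pvStatuses, pvThresholds, pvLabels,
      pvBisectLeft, f0, f1, f2, f3, f4, f5, f6, f7, f8, f9]


-- ===== VERDICT (by name: the statement is the Claim_ definition above) =====
theorem get_took_status_spec : Claim_equal_get_took_status := by
  intro t _; exact get_took_status_eval t
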